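-- pv_equiv track=rewrite | github.com/AleksandrLagutov/my_education | Algorithms and data structures MFTI/lesson_15_contest_semestr/test_g.py | triangle_pasc
-- ===== SOURCE A (Python) =====
-- def triangle_pasc(n):
--     matrix = [[0]*(n+2) for i in range(n+2)]
--     matrix[1][1] = 1
--     for i in range(1, n+2):
--         for j in range(1, n+2):
--             if i == 1 and j == 1:
--                 matrix[1][1] = 1
--             else:
--                 matrix[i][j] = matrix[i-1][j] + matrix[i][j-1]
--
--     return matrix
-- ===== SOURCE B (Python) =====
-- def triangle_pasc(n):
--     # closed form: matrix[i][j] = C(i+j-2, i-1) for i,j >= 1; row/col 0 stay zero.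
--     # Each row is filled left-to-right by the multiplicative recurrence
--     # C(i+j-1, i-1) = C(i+j-2, i-1) * (i+j-1) // j  (exact division), so no
--     # cross-row additive sums are kept.
--     size = max(n + 2, 0)
--     matrix = [[0] * size for _ in range(size)]
--     for i in range(1, size):
--         c = 1
--         for j in range(1, size):
--             matrix[i][j] = c
--             c = c * (i + j - 1) // j
--     return matrix
-- ===== Notes on version B (the rewrite author's own statement) =====
-- stated objective: alternative
-- what changed: Replaces the additive Pascal DP (each cell = top + left neighbour, rows depend on the previous row) by the closed form C(i+j-2, i-1), computed per row with the multiplicative recurrence c = c*(i+j-1)//j, so no cross-row sums are kept.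
import Mathlib
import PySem

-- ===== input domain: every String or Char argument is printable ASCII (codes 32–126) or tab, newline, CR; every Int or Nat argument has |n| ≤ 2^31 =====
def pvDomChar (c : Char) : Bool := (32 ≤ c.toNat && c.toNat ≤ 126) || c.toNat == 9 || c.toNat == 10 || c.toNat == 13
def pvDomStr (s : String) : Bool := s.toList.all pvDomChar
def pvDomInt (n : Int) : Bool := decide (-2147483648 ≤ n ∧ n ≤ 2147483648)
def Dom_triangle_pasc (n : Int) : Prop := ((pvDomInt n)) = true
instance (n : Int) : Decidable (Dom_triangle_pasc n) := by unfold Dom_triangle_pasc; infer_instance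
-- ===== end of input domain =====

-- B replaces A's additive Pascal DP (cell = top + left) by the per-row
-- multiplicative recurrence for C(i+j-2, i-1); same quadratic cost (objective: alternative).

-- ===== PORT A =====
-- matrix[a][b] read/write helpers; under Pre_ every index used is in range,
-- so the default values of getD are never returned.
def pvGet2 (m : List (List Int)) (a b : Nat) : Int := (m.getD a []).getD b 0
def pvSet2 (m : List (List Int)) (a b : Nat) (v : Int) : List (List Int) :=
  m.set a ((m.getD a []).set b v)

-- body of A's inner loop (on every call 1 ≤ i, j, so .toNat is exact)
def pvStepA (m : List (List Int)) (i j : Int) : List (List Int) :=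
  if i = 1 ∧ j = 1 then pvSet2 m 1 1 1
  else pvSet2 m i.toNat j.toNat
        (pvGet2 m (i-1).toNat j.toNat + pvGet2 m i.toNat (j-1).toNat)

-- body of A's outer loop
def pvRowA (n : Int) (m : List (List Int)) (i : Int) : List (List Int) :=
  (PySem.List.pyRange 1 (n+2) 1).foldl (fun m j => pvStepA m i j) m

def triangle_pasc (n : Int) : List (List Int) :=
  (PySem.List.pyRange 1 (n+2) 1).foldl (pvRowA n)
    (pvSet2 (List.replicate (n+2).toNat (List.replicate (n+2).toNat (0:Int))) 1 1 1)
    -- init: [[0]*(n+2) for i in range(n+2)], then matrix[1][1] = 1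
    -- (IndexError when n < 0: excluded by Pre_)

-- ===== PORT B =====
-- body of B's inner loop: state is (matrix, c)
def pvStepB (p : List (List Int) × Int) (i j : Int) : List (List Int) × Int :=
  (pvSet2 p.1 i.toNat j.toNat p.2, PySem.Int.floordiv (p.2 * (i + j - 1)) j)

-- body of B's outer loop
def pvRowB (size : Int) (m : List (List Int)) (i : Int) : List (List Int) :=
  ((PySem.List.pyRange 1 size 1).foldl (fun p j => pvStepB p i j) (m, 1)).1

def triangle_pasc_alt (n : Int) : List (List Int) :=
  (PySem.List.pyRange 1 (max (n+2) 0) 1).foldl (pvRowB (max (n+2) 0))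
    (List.replicate (max (n+2) 0).toNat (List.replicate (max (n+2) 0).toNat (0:Int)))

-- ===== PRECONDITION & SPEC =====
-- Pre_ excludes exactly n < 0, where A raises IndexError at matrix[1][1] = 1.
def Pre_triangle_pasc (n : Int) : Prop := 0 ≤ n
instance (n : Int) : Decidable (Pre_triangle_pasc n) := by unfold Pre_triangle_pasc; infer_instance
def pvWitness_triangle_pasc : Int := 3

def Spec_triangle_pasc (n : Int) (out : List (List Int)) : Prop := out = triangle_pasc_alt n
instance (n : Int) (out : List (List Int)) : Decidable (Spec_triangle_pasc n out) := by unfold Spec_triangle_pasc; infer_instance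

-- ===== CLAIM (what is proved, stated in full; the proofs are below) =====
def Claim_equal_triangle_pasc : Prop := ∀ (n : Int), Dom_triangle_pasc n → Pre_triangle_pasc n → Spec_triangle_pasc n (triangle_pasc n)

-- ===== LEMMAS AND PROOFS =====

-- the common closed-form value of entry (a,b)
def pvPasc (a b : Nat) : Int := if a = 0 ∨ b = 0 then 0 else ((a + b - 2).choose (a-1) : Int)

lemma pvPasc_rec (a b : Nat) (ha : 1 ≤ a) (hb : 1 ≤ b) (h : ¬(a = 1 ∧ b = 1)) :
    pvPasc a b = pvPasc (a-1) b + pvPasc a (b-1) := by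
  obtain ⟨a', rfl⟩ : ∃ a', a = a' + 1 := ⟨a-1, by omega⟩
  obtain ⟨b', rfl⟩ : ∃ b', b = b' + 1 := ⟨b-1, by omega⟩
  rcases Nat.eq_zero_or_pos a' with rfl | ha'
  · obtain ⟨y, rfl⟩ : ∃ y, b' = y + 1 := ⟨b'-1, by omega⟩
    simp [pvPasc, Nat.choose_zero_right, show 0+1+(y+1+1)-2 = y+1 by omega,
      show 0+1+(y+1)-2 = y by omega]
  · rcases Nat.eq_zero_or_pos b' with rfl | hb'
    · obtain ⟨x, rfl⟩ : ∃ x, a' = x + 1 := ⟨a'-1, by omega⟩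
      simp [pvPasc, show x+1+1+(0+1)-2 = x+1 by omega, show x+1+(0+1)-2 = x by omega,
        Nat.choose_self]
    · obtain ⟨x, rfl⟩ : ∃ x, a' = x + 1 := ⟨a'-1, by omega⟩
      obtain ⟨y, rfl⟩ : ∃ y, b' = y + 1 := ⟨b'-1, by omega⟩
      simp only [pvPasc]
      rw [if_neg (by omega), if_neg (by omega), if_neg (by omega),
        show x+1+1+(y+1+1)-2 = (x+y+1)+1 by omega, show x+1+1-1 = x+1 by omega,
        show x+1+(y+1+1)-2 = x+y+1 by omega, show x+1-1 = x by omega,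
        show x+1+1+(y+1+1-1)-2 = x+y+1 by omega]
      push_cast [Nat.choose_succ_succ (x+y+1) x]
      ring

def pvShape (N : Nat) (m : List (List Int)) : Prop :=
  m.length = N ∧ ∀ r ∈ m, r.length = N

lemma pvShape_set2 {N : Nat} {m : List (List Int)} (h : pvShape N m) (a b : Nat) (v : Int) :
    pvShape N (pvSet2 m a b v) := by
  obtain ⟨h1, h2⟩ := h
  by_cases ha : a < m.length
  · refine ⟨by simp [pvSet2, h1], ?_⟩
    intro r hr
    rcases List.mem_or_eq_of_mem_set hr with hr | rfl
    · exact h2 r hr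
    · have : m.getD a [] = m[a] := by
        simp [List.getD_eq_getElem?_getD, List.getElem?_eq_getElem ha]
      rw [List.length_set, this]
      exact h2 _ (List.getElem_mem _)
  · rw [pvSet2, List.set_eq_of_length_le (by omega)]
    exact ⟨h1, h2⟩

lemma pvGet2_set2_ne {m : List (List Int)} {a b x y : Nat} (v : Int)
    (h : ¬(x = a ∧ y = b)) : pvGet2 (pvSet2 m a b v) x y = pvGet2 m x y := by
  by_cases hx : x = a
  · subst hx
    have hy : y ≠ b := by tauto
    by_cases hl : x < m.length
    · simp [pvGet2, pvSet2, List.getD_eq_getElem?_getD,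
        List.getElem?_set_self hl, List.getElem?_eq_getElem hl,
        List.getElem?_set_ne (Ne.symm hy)]
    · rw [pvSet2, List.set_eq_of_length_le (by omega)]
  · simp [pvGet2, pvSet2, List.getD_eq_getElem?_getD, List.getElem?_set_ne (fun hh => hx hh.symm)]

lemma pvGet2_set2_self {N : Nat} {m : List (List Int)} (h : pvShape N m) {a b : Nat}
    (ha : a < N) (hb : b < N) (v : Int) : pvGet2 (pvSet2 m a b v) a b = v := by
  obtain ⟨h1, h2⟩ := h
  have hl : a < m.length := by omega
  have hrow : m.getD a [] = m[a] := by
    simp [List.getD_eq_getElem?_getD, List.getElem?_eq_getElem hl]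
  have hbl : b < (m.getD a []).length := by
    rw [hrow]; rw [h2 _ (List.getElem_mem _)]; omega
  have houter : (m.set a ((m.getD a []).set b v)).getD a [] = (m.getD a []).set b v := by
    rw [List.getD_eq_getElem?_getD, List.getElem?_set_self hl, Option.getD_some]
  rw [pvGet2, pvSet2, houter, List.getD_eq_getElem?_getD, List.getElem?_set_self hbl,
    Option.getD_some]

def pvInvA (N i j : Nat) (m : List (List Int)) : Prop :=
  pvShape N m ∧ ∀ a b : Nat, a < N → b < N →
    pvGet2 m a b = if a < i ∨ (a = i ∧ (b < j ∨ (i = 1 ∧ b = 1))) then pvPasc a b else 0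

lemma pvStepA_inv {N i j : Nat} (hi1 : 1 ≤ i) (hiN : i < N) (hj1 : 1 ≤ j) (hjN : j < N)
    {m : List (List Int)} (h : pvInvA N i j m) :
    pvInvA N i (j+1) (pvStepA m (i:Int) (j:Int)) := by
  obtain ⟨hs, hv⟩ := h
  by_cases hc : i = 1 ∧ j = 1
  · obtain ⟨rfl, rfl⟩ := hc
    rw [pvStepA, if_pos (by norm_num)]
    refine ⟨pvShape_set2 hs 1 1 1, ?_⟩
    intro a b haN hbN
    by_cases hab : a = 1 ∧ b = 1
    · obtain ⟨rfl, rfl⟩ := hab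
      rw [pvGet2_set2_self hs hiN hjN]
      simp [pvPasc]
    · rw [pvGet2_set2_ne _ hab, hv a b haN hbN]
      have : (a < 1 ∨ a = 1 ∧ (b < 1 ∨ 1 = 1 ∧ b = 1)) ↔
             (a < 1 ∨ a = 1 ∧ (b < 1 + 1 ∨ 1 = 1 ∧ b = 1)) := by
        constructor <;> (intro hh; omega)
      split_ifs with h1 h2 h2 <;> first | rfl | (exfalso; omega)
  · rw [pvStepA, if_neg (by omega)]
    have e1 : ((i:Int)).toNat = i := by omega
    have e2 : ((i:Int)-1).toNat = i-1 := by omega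
    have e3 : ((j:Int)).toNat = j := by omega
    have e4 : ((j:Int)-1).toNat = j-1 := by omega
    rw [e1, e2, e3, e4]
    have g1 : pvGet2 m (i-1) j = pvPasc (i-1) j := by
      rw [hv (i-1) j (by omega) (by omega), if_pos (by omega)]
    have g2 : pvGet2 m i (j-1) = pvPasc i (j-1) := by
      rw [hv i (j-1) (by omega) (by omega), if_pos (by omega)]
    rw [g1, g2, ← pvPasc_rec i j hi1 hj1 hc]
    refine ⟨pvShape_set2 hs i j _, ?_⟩
    intro a b haN hbN
    by_cases hab : a = i ∧ b = j
    · obtain ⟨rfl, rfl⟩ := hab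
      rw [pvGet2_set2_self hs haN hbN, if_pos (by omega)]
    · rw [pvGet2_set2_ne _ hab, hv a b haN hbN]
      split_ifs with h1 h2 h2 <;> first | rfl | (exfalso; omega)

def pvInvB (N i j : Nat) (p : List (List Int) × Int) : Prop :=
  pvShape N p.1 ∧ p.2 = (((i-1) + (j-1)).choose (i-1) : Int) ∧
  ∀ a b : Nat, a < N → b < N →
    pvGet2 p.1 a b = if a < i ∨ (a = i ∧ b < j) then pvPasc a b else 0

lemma pvStepB_inv {N i j : Nat} (hi1 : 1 ≤ i) (hiN : i < N) (hj1 : 1 ≤ j) (hjN : j < N)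
    {p : List (List Int) × Int} (h : pvInvB N i j p) :
    pvInvB N i (j+1) (pvStepB p (i:Int) (j:Int)) := by
  obtain ⟨hs, hcv, hv⟩ := h
  have e1 : ((i:Int)).toNat = i := by omega
  have e3 : ((j:Int)).toNat = j := by omega
  refine ⟨?_, ?_, ?_⟩
  · rw [pvStepB]; exact pvShape_set2 hs _ _ _
  · show PySem.Int.floordiv (p.2 * ((i:Int) + (j:Int) - 1)) (j:Int)
      = (((i-1) + (j+1-1)).choose (i-1) : Int)
    rw [hcv]
    have ecast : ((i:Int) + (j:Int) - 1) = (((i-1+(j-1)) + 1 : Nat) : Int) := by push_cast; omega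
    rw [ecast, ← Nat.cast_mul, Nat.choose_mul_succ_eq,
      show i-1+(j-1)+1-(i-1) = j by omega, PySem.Int.floordiv_natCast,
      Nat.mul_div_cancel _ (by omega), show i-1+(j+1-1) = i-1+(j-1)+1 by omega]
  · intro a b haN hbN
    show pvGet2 (pvSet2 p.1 ((i:Int)).toNat ((j:Int)).toNat p.2) a b = _
    rw [e1, e3]
    by_cases hab : a = i ∧ b = j
    · obtain ⟨rfl, rfl⟩ := hab
      rw [pvGet2_set2_self hs haN hbN, hcv, if_pos (by omega), pvPasc,
        if_neg (by omega), show a+b-2 = a-1+(b-1) by omega]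
    · rw [pvGet2_set2_ne _ hab, hv a b haN hbN]
      split_ifs with h1 h2 h2 <;> first | rfl | (exfalso; omega)

lemma pvInnerA {N i : Nat} (hi1 : 1 ≤ i) (hiN : i < N) :
    ∀ k : Nat, 1 ≤ k → k ≤ N → ∀ m, pvInvA N i 1 m →
    pvInvA N i k ((PySem.List.pyRange 1 (k:Int) 1).foldl (fun m j => pvStepA m (i:Int) j) m) := by
  intro k hk1 hkN
  induction k, hk1 using Nat.le_induction with
  | base =>
    intro m h
    rw [show ((1:Nat):Int) = 1 by norm_num, PySem.List.pyRange_one_eq_nil le_rfl, List.foldl_nil]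
    exact h
  | succ k hk ih =>
    intro m h
    rw [show (((k+1:Nat)):Int) = (k:Int) + 1 by push_cast; ring,
      PySem.List.pyRange_one_succ_right (by omega), List.foldl_append, List.foldl_cons,
      List.foldl_nil]
    exact pvStepA_inv hi1 hiN hk (by omega) (ih (by omega) m h)

lemma pvRowA_inv {n : Int} {N : Nat} (hn : n + 2 = (N:Int)) {i : Nat} (hi1 : 1 ≤ i)
    (hiN : i < N) {m : List (List Int)} (h : pvInvA N i 1 m) :
    pvInvA N (i+1) 1 (pvRowA n m (i:Int)) := by
  rw [pvRowA, hn]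
  obtain ⟨hs, hv⟩ := pvInnerA hi1 hiN N (by omega) le_rfl m h
  refine ⟨hs, ?_⟩
  intro a b haN hbN
  rw [hv a b haN hbN]
  by_cases hb0 : b = 0
  · subst hb0; simp [pvPasc]
  · split_ifs with h1 h2 h2 <;> first | rfl | (exfalso; omega)

def pvMatB (N i : Nat) (m : List (List Int)) : Prop :=
  pvShape N m ∧ ∀ a b : Nat, a < N → b < N →
    pvGet2 m a b = if a < i then pvPasc a b else 0

lemma pvInnerB {N i : Nat} (hi1 : 1 ≤ i) (hiN : i < N) :
    ∀ k : Nat, 1 ≤ k → k ≤ N → ∀ p, pvInvB N i 1 p →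
    pvInvB N i k ((PySem.List.pyRange 1 (k:Int) 1).foldl (fun p j => pvStepB p (i:Int) j) p) := by
  intro k hk1 hkN
  induction k, hk1 using Nat.le_induction with
  | base =>
    intro p h
    rw [show ((1:Nat):Int) = 1 by norm_num, PySem.List.pyRange_one_eq_nil le_rfl, List.foldl_nil]
    exact h
  | succ k hk ih =>
    intro p h
    rw [show (((k+1:Nat)):Int) = (k:Int) + 1 by push_cast; ring,
      PySem.List.pyRange_one_succ_right (by omega), List.foldl_append, List.foldl_cons,
      List.foldl_nil]
    exact pvStepB_inv hi1 hiN hk (by omega) (ih (by omega) p h)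

lemma pvRowB_inv {size : Int} {N : Nat} (hn : size = (N:Int)) {i : Nat} (hi1 : 1 ≤ i)
    (hiN : i < N) {m : List (List Int)} (h : pvMatB N i m) :
    pvMatB N (i+1) (pvRowB size m (i:Int)) := by
  obtain ⟨hs0, hv0⟩ := h
  have hstart : pvInvB N i 1 (m, (1:Int)) := by
    refine ⟨hs0, by simp, ?_⟩
    intro a b haN hbN
    rw [hv0 a b haN hbN]
    by_cases hb0 : b = 0
    · subst hb0; simp [pvPasc]
    · split_ifs with h1 h2 h2 <;> first | rfl | (exfalso; omega)
  rw [pvRowB, hn]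
  obtain ⟨hs, _, hv⟩ := pvInnerB hi1 hiN N (by omega) le_rfl (m, 1) hstart
  refine ⟨hs, ?_⟩
  intro a b haN hbN
  rw [hv a b haN hbN]
  split_ifs with h1 h2 h2 <;> first | rfl | (exfalso; omega)

lemma pvOuterA {n : Int} {N : Nat} (hn : n + 2 = (N:Int)) :
    ∀ k : Nat, 1 ≤ k → k ≤ N → ∀ m, pvInvA N 1 1 m →
    pvInvA N k 1 ((PySem.List.pyRange 1 (k:Int) 1).foldl (pvRowA n) m) := by
  intro k hk1 hkN
  induction k, hk1 using Nat.le_induction with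
  | base =>
    intro m h
    rw [show ((1:Nat):Int) = 1 by norm_num, PySem.List.pyRange_one_eq_nil le_rfl, List.foldl_nil]
    exact h
  | succ k hk ih =>
    intro m h
    rw [show (((k+1:Nat)):Int) = (k:Int) + 1 by push_cast; ring,
      PySem.List.pyRange_one_succ_right (by omega), List.foldl_append, List.foldl_cons,
      List.foldl_nil]
    exact pvRowA_inv hn hk (by omega) (ih (by omega) m h)

lemma pvOuterB {size : Int} {N : Nat} (hn : size = (N:Int)) :
    ∀ k : Nat, 1 ≤ k → k ≤ N → ∀ m, pvMatB N 1 m →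
    pvMatB N k ((PySem.List.pyRange 1 (k:Int) 1).foldl (pvRowB size) m) := by
  intro k hk1 hkN
  induction k, hk1 using Nat.le_induction with
  | base =>
    intro m h
    rw [show ((1:Nat):Int) = 1 by norm_num, PySem.List.pyRange_one_eq_nil le_rfl, List.foldl_nil]
    exact h
  | succ k hk ih =>
    intro m h
    rw [show (((k+1:Nat)):Int) = (k:Int) + 1 by push_cast; ring,
      PySem.List.pyRange_one_succ_right (by omega), List.foldl_append, List.foldl_cons,
      List.foldl_nil]
    exact pvRowB_inv hn hk (by omega) (ih (by omega) m h)

def pvTable (N : Nat) : List (List Int) :=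
  (List.range N).map (fun a => (List.range N).map (fun b => pvPasc a b))

lemma pvEq_table {N : Nat} {m : List (List Int)} (hs : pvShape N m)
    (hv : ∀ a b : Nat, a < N → b < N → pvGet2 m a b = pvPasc a b) : m = pvTable N := by
  obtain ⟨h1, h2⟩ := hs
  apply List.ext_getElem
  · simp [pvTable, h1]
  · intro a ha ha'
    have haN : a < N := by omega
    have hrow : m[a] ∈ m := List.getElem_mem _
    apply List.ext_getElem
    · simp [pvTable, h2 _ hrow]
    · intro b hb hb'
      have hbN : b < N := by
        have := h2 _ hrow; omega
      have : pvGet2 m a b = m[a][b] := by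
        simp [pvGet2, List.getD_eq_getElem?_getD, List.getElem?_eq_getElem ha,
          List.getElem?_eq_getElem hb]
      simp only [pvTable, List.getElem_map, List.getElem_range]
      rw [← this, hv a b haN hbN]

lemma pvRep_shape (N : Nat) : pvShape N (List.replicate N (List.replicate N (0:Int))) := by
  refine ⟨by simp, ?_⟩
  intro r hr
  rw [List.eq_of_mem_replicate hr]; simp

lemma pvRep_get (N a b : Nat) : pvGet2 (List.replicate N (List.replicate N (0:Int))) a b = 0 := by
  simp [pvGet2, List.getD_eq_getElem?_getD, List.getElem?_replicate]
  split_ifs <;> simp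

theorem pv_main (n : Int) (hpre : 0 ≤ n) : triangle_pasc n = triangle_pasc_alt n := by
  have hn : n + 2 = (((n+2).toNat : Nat) : Int) := by omega
  set N := (n+2).toNat with hNdef
  have hN2 : 2 ≤ N := by omega
  have hmax : max (n+2) 0 = (N:Int) := by omega
  have hA : triangle_pasc n = pvTable N := by
    rw [triangle_pasc, hn]
    have hinit : pvInvA N 1 1
        (pvSet2 (List.replicate ((N:Int)).toNat (List.replicate ((N:Int)).toNat (0:Int))) 1 1 1) := by
      rw [show ((N:Int)).toNat = N by omega]
      refine ⟨pvShape_set2 (pvRep_shape N) 1 1 1, ?_⟩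
      intro a b haN hbN
      by_cases hab : a = 1 ∧ b = 1
      · obtain ⟨rfl, rfl⟩ := hab
        rw [pvGet2_set2_self (pvRep_shape N) (by omega) (by omega), if_pos (by omega)]
        simp [pvPasc]
      · rw [pvGet2_set2_ne _ hab, pvRep_get]
        split_ifs with hcond
        · rw [pvPasc, if_pos (by omega)]
        · rfl
    obtain ⟨hs, hv⟩ := pvOuterA hn N (by omega) le_rfl _ hinit
    exact pvEq_table hs (fun a b haN hbN => by rw [hv a b haN hbN, if_pos (by omega)])
  have hB : triangle_pasc_alt n = pvTable N := by
    rw [triangle_pasc_alt, hmax]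
    have hinit : pvMatB N 1
        (List.replicate ((N:Int)).toNat (List.replicate ((N:Int)).toNat (0:Int))) := by
      rw [show ((N:Int)).toNat = N by omega]
      refine ⟨pvRep_shape N, ?_⟩
      intro a b haN hbN
      rw [pvRep_get]
      split_ifs with hcond
      · rw [pvPasc, if_pos (by omega)]
      · rfl
    obtain ⟨hs, hv⟩ := pvOuterB (size := (N:Int)) rfl N (by omega) le_rfl _ hinit
    exact pvEq_table hs (fun a b haN hbN => by rw [hv a b haN hbN, if_pos (by omega)])
  rw [hA, hB]

-- ===== VERDICT (by name: the statement is the Claim_ definition above) =====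
theorem triangle_pasc_spec : Claim_equal_triangle_pasc := by
  intro n _ hpre
  unfold Spec_triangle_pasc
  exact pv_main n hpre
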